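-- pv_equiv track=rewrite | github.com/awellisz/BS-Poker | main.py | fullerhouse
-- ===== SOURCE A (Python) =====
-- from collections import Counter
-- import itertools
--
-- def contains_all(a, b):
--     """
--     Utility function
--     Check if array A contains all elements of B, including with repeated values.
--     E.g. containsall([11, 4, 6], [4, 4]) -> False
--     E.g. containsall([11, 4, 6], [6, 11]) -> True
--     """
--     counter_a = Counter(a)
--     counter_b = Counter(b)
--     return all(v <= counter_a[k] for k, v in counter_b.items())
--
-- def remove_match(hand, match):
--     """
--     Utility function
--     Remove the list 'match' from the list 'hand'
--     E.g. remove_match([3, 6, 8, 1, 1], [1, 6]) -> [3, 8, 1]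
--     (actually returns a Counter object instead of a list but example is just for clarity,
--     the returned object effectively functions as a list in the hand-checking functions below)
--     """
--     new_hand = Counter(hand)
--     new_hand.subtract(Counter(match))
--     return new_hand
--
-- def threeok(hand, c):
--     """
--     Given a hand, return true if 3-of-a-kind of the given card exists
--     """
--     matches = [[c, c, c], [c, c, 2], [c, 2, 2], [2, 2, 2]]
--     for match in matches:
--         if contains_all(hand, match):
--             return True
--     return False
--
-- def fullerhouse(hand, c):
--     """
--     Return true if there's a fuller house of the given card (four of a kind of the card + three of a kind of any other card)
--     """
--     if (len(hand) < 7):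
--         return False
--
--     fourok_matches = [[c, c, c, c], [c, c, c, 2], [c, c, 2, 2], [c, 2, 2, 2], [2, 2, 2, 2]]
--     for match in fourok_matches:
--         if contains_all(hand, match):
--             new_hand = remove_match(hand, match)
--             for i in itertools.chain(range(2, c), range(c + 1, 15)):
--                 if threeok(new_hand, i):
--                     return True
--     return False
-- ===== SOURCE B (Python) =====
-- from collections import Counter
--
-- def fullerhouse(hand, c):
--     # One count table + arithmetic: use the minimum number of wild 2s for the
--     # four-of-a-kind, then check whether any other rank in A's candidate range
--     # can reach a triple with the leftover wilds.
--     if len(hand) < 7: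
--         return False
--     cnt = Counter(hand)
--     wilds = cnt[2]
--     if c == 2:
--         if wilds < 4:
--             return False
--         r = wilds - 4
--     else:
--         if cnt[c] + wilds < 4:
--             return False
--         r = wilds - max(0, 4 - cnt[c])
--     if r >= 3:
--         return True
--     return any((2 <= i < c or c + 1 <= i < 15) and i != 2 and cnt[i] + r >= 3
--                for i in cnt)
-- ===== Notes on version B (the rewrite author's own statement) =====
-- stated objective: faster
-- what changed: Replaces A's enumeration of 5 wild four-of-a-kind patterns (each rebuilding Counters and rescanning every candidate rank with contains_all/remove_match) by one Counter built once and a single arithmetic pass: use the minimum wild 2s for the four-of-a-kind and check each distinct rank of the hand for a triple with the leftover wilds.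
import Mathlib
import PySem

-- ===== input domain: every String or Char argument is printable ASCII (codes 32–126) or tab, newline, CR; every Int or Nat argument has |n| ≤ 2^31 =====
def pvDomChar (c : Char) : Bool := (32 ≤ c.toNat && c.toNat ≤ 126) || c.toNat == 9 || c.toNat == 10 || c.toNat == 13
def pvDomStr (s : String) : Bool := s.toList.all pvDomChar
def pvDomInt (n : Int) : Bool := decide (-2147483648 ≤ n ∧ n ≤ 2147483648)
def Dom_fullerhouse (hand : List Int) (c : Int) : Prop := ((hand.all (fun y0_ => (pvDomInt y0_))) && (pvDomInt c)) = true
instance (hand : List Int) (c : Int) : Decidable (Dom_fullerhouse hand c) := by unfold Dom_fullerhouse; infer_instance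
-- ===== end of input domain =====

-- B replaces A's pattern enumeration (5 four-of-a-kind wild patterns × rescan per rank)
-- by one Counter and a leftover-wilds arithmetic pass over the distinct ranks (simpler/faster pass structure).

-- ===== PORT A =====
-- contains_all(a, b): `a` is passed as its Counter (Counter(list) and Counter(Counter)
-- give the same count table, which is all contains_all reads).
def containsAll (a : PySem.Dict Int Int) (b : List Int) : Bool :=
  (PySem.Dict.counter b).items.all (fun kv => decide (kv.2 ≤ a.getD kv.1 0))

-- remove_match(hand, match): Counter(hand) minus the counts of `match` (Counter.subtract keeps keys).
def removeMatch (hand : List Int) (mtch : List Int) : PySem.Dict Int Int :=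
  (PySem.Dict.counter mtch).items.foldl
    (fun d kv => d.insert kv.1 (d.getD kv.1 0 - kv.2)) (PySem.Dict.counter hand)

def threeok (h : PySem.Dict Int Int) (c : Int) : Bool :=
  [[c, c, c], [c, c, 2], [c, 2, 2], [2, 2, 2]].any (fun m => containsAll h m)

def fullerhouse (hand : List Int) (c : Int) : Bool :=
  if hand.length < 7 then false
  else
    [[c, c, c, c], [c, c, c, 2], [c, c, 2, 2], [c, 2, 2, 2], [2, 2, 2, 2]].any (fun m =>
      if containsAll (PySem.Dict.counter hand) m then
        let nh := removeMatch hand m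
        (PySem.List.pyRange 2 c 1 ++ PySem.List.pyRange (c + 1) 15 1).any (fun i => threeok nh i)
      else false)

-- ===== PORT B =====
def fullerhouse_alt (hand : List Int) (c : Int) : Bool :=
  if hand.length < 7 then false
  else
    let cnt := PySem.Dict.counter hand
    let wilds := cnt.getD 2 0
    if c = 2 then
      if wilds < 4 then false
      else
        let r := wilds - 4
        if 3 ≤ r then true
        else
          cnt.keys.any (fun i =>
            ((decide (2 ≤ i) && decide (i < c)) || (decide (c + 1 ≤ i) && decide (i < 15)))
              && !(i == 2) && decide (3 ≤ cnt.getD i 0 + r))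
    else
      if cnt.getD c 0 + wilds < 4 then false
      else
        let r := wilds - max 0 (4 - cnt.getD c 0)
        if 3 ≤ r then true
        else
          cnt.keys.any (fun i =>
            ((decide (2 ≤ i) && decide (i < c)) || (decide (c + 1 ≤ i) && decide (i < 15)))
              && !(i == 2) && decide (3 ≤ cnt.getD i 0 + r))

-- ===== PRECONDITION & SPEC =====
def Spec_fullerhouse (hand : List Int) (c : Int) (out : Bool) : Prop := out = fullerhouse_alt hand c
instance (hand : List Int) (c : Int) (out : Bool) : Decidable (Spec_fullerhouse hand c out) := by unfold Spec_fullerhouse; infer_instance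

-- ===== CLAIM (what is proved, stated in full; the proofs are below) =====
def Claim_equal_fullerhouse : Prop := ∀ (hand : List Int) (c : Int), Dom_fullerhouse hand c → Spec_fullerhouse hand c (fullerhouse hand c)

-- ===== LEMMAS AND PROOFS =====

lemma containsAll_iff (d : PySem.Dict Int Int) (b : List Int) :
    containsAll d b = true ↔ ∀ k ∈ b, (b.count k : Int) ≤ d.getD k 0 := by
  simp [containsAll, PySem.Dict.items_counter, List.all_eq_true, PySem.Set.mem_ofList]

lemma sum_filter_map_pair (l : List Int) (f : Int → Int) (k : Int) (h : l.Nodup) :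
    (((l.map (fun j => (j, f j))).filter (fun p => p.1 == k)).map Prod.snd).sum
      = if k ∈ l then f k else 0 := by
  induction l with
  | nil => simp
  | cons a l ih =>
    rw [List.nodup_cons] at h
    obtain ⟨ha, hl⟩ := h
    by_cases hak : a = k
    · subst hak
      simp [ih hl, ha]
    · simp [hak, ih hl, Ne.symm hak]

lemma getD_foldl_sub (ps : List (Int × Int)) (d0 : PySem.Dict Int Int) (k : Int) :
    (ps.foldl (fun d kv => d.insert kv.1 (d.getD kv.1 0 - kv.2)) d0).getD k 0
      = d0.getD k 0 - ((ps.filter (fun p => p.1 == k)).map Prod.snd).sum := by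
  induction ps generalizing d0 with
  | nil => simp
  | cons p ps ih =>
    rw [List.foldl_cons, ih, List.filter_cons]
    by_cases hpk : p.1 = k
    · subst hpk
      simp [PySem.Dict.getD_insert]
      omega
    · have hkp : ¬ k = p.1 := fun h => hpk h.symm
      simp [hpk, hkp, PySem.Dict.getD_insert]

lemma getD_removeMatch (hand m : List Int) (k : Int) :
    (removeMatch hand m).getD k 0 = (hand.count k : Int) - (m.count k : Int) := by
  rw [removeMatch, getD_foldl_sub, PySem.Dict.items_counter,
      sum_filter_map_pair _ _ _ (PySem.Set.nodup_ofList m), PySem.Dict.getD_counter]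
  by_cases hk : k ∈ m
  · simp [PySem.Set.mem_ofList, hk]
  · simp [PySem.Set.mem_ofList, hk, List.count_eq_zero_of_not_mem hk]

lemma threeok_two (h : PySem.Dict Int Int) : threeok h 2 = true ↔ 3 ≤ h.getD 2 0 := by
  simp only [threeok, List.any_cons, List.any_nil, Bool.or_eq_true, containsAll_iff, Bool.false_eq_true, or_false]
  constructor
  · rintro (h3 | h3 | h3 | h3) <;> · have := h3 2 (by simp); simp at this; omega
  · intro h3
    refine Or.inl (fun k hk => ?_)
    simp at hk; subst hk; simp; omega

lemma threeok_iff (h : PySem.Dict Int Int) (i : Int) (hi : i ≠ 2) :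
    threeok h i = true ↔
      (3 ≤ h.getD i 0 ∨ (2 ≤ h.getD i 0 ∧ 1 ≤ h.getD 2 0) ∨
       (1 ≤ h.getD i 0 ∧ 2 ≤ h.getD 2 0) ∨ 3 ≤ h.getD 2 0) := by
  have h2i : (2 : Int) ≠ i := Ne.symm hi
  simp only [threeok, List.any_cons, List.any_nil, Bool.or_eq_true, containsAll_iff, Bool.false_eq_true, or_false]
  constructor
  · rintro (h3 | h3 | h3 | h3)
    · have := h3 i (by simp); simp [List.count_cons, hi] at this; omega
    · have ha := h3 i (by simp); have hb := h3 2 (by simp)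
      simp [List.count_cons, hi, h2i] at ha hb; omega
    · have ha := h3 i (by simp); have hb := h3 2 (by simp)
      simp [List.count_cons, hi, h2i] at ha hb; omega
    · have := h3 2 (by simp); simp at this; omega
  · rintro (h3 | ⟨ha, hb⟩ | ⟨ha, hb⟩ | h3)
    · refine Or.inl (fun k hk => ?_)
      simp at hk; subst hk; simp [List.count_cons, hi]; omega
    · refine Or.inr (Or.inl (fun k hk => ?_))
      simp at hk
      rcases hk with hk | hk <;> subst hk <;> simp [List.count_cons, hi, h2i] <;> omega
    · refine Or.inr (Or.inr (Or.inl (fun k hk => ?_)))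
      simp at hk
      rcases hk with hk | hk <;> subst hk <;> simp [List.count_cons, hi, h2i] <;> omega
    · refine Or.inr (Or.inr (Or.inr (fun k hk => ?_)))
      simp at hk; subst hk; simp; omega

def inS (c i : Int) : Prop := (2 ≤ i ∧ i < c) ∨ (c + 1 ≤ i ∧ i < 15)

def BigD (x r : Int) : Prop := 3 ≤ x ∨ (2 ≤ x ∧ 1 ≤ r) ∨ (1 ≤ x ∧ 2 ≤ r) ∨ 3 ≤ r

lemma ifFalseEq (p : Prop) [Decidable p] (x : Bool) :
    ((if p then x else false) = true) = (p ∧ x = true) := by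
  split_ifs with h <;> simp [h]

lemma threeok_rm (hand m : List Int) (i : Int) (hi2 : i ≠ 2) :
    threeok (removeMatch hand m) i = true ↔
      BigD ((hand.count i : Int) - m.count i) ((hand.count 2 : Int) - m.count 2) := by
  rw [threeok_iff _ _ hi2]; simp [getD_removeMatch, BigD]

lemma threeok_rm_two (hand m : List Int) :
    threeok (removeMatch hand m) 2 = true ↔ 3 ≤ (hand.count 2 : Int) - m.count 2 := by
  rw [threeok_two]; simp [getD_removeMatch]

lemma containsAll_counter_iff (hand m : List Int) :
    containsAll (PySem.Dict.counter hand) m = true ↔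
      ∀ k ∈ m, (m.count k : Int) ≤ hand.count k := by
  simp [containsAll_iff, PySem.Dict.getD_counter]

lemma inner_iff (hand m : List Int) (c : Int) :
    ((PySem.List.pyRange 2 c 1 ++ PySem.List.pyRange (c + 1) 15 1).any
        (fun i => threeok (removeMatch hand m) i) = true)
      ↔ ∃ i, inS c i ∧ threeok (removeMatch hand m) i = true := by
  simp only [List.any_eq_true, List.mem_append, PySem.List.mem_pyRange_one, inS]

def Rof (hand : List Int) (c : Int) : Int :=
  if c = 2 then (hand.count 2 : Int) - 4
  else (hand.count 2 : Int) - max 0 (4 - (hand.count c : Int))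

def phi (hand : List Int) (c i : Int) : Prop :=
  if i = 2 then 3 ≤ Rof hand c else 3 ≤ (hand.count i : Int) + Rof hand c

def avail (hand : List Int) (c : Int) : Int :=
  if c = 2 then (hand.count 2 : Int) else (hand.count c : Int) + hand.count 2

lemma inS_ne (c i : Int) (h : inS c i) : i ≠ c := by
  rcases h with ⟨h1, h2⟩ | ⟨h1, h2⟩ <;> omega

lemma fwd_case (hand : List Int) (c i : Int) (hc : c ≠ 2) (m2 : Int)
    (hm2a : 0 ≤ m2) (hm2b : m2 ≤ 4)
    (h1 : 4 - m2 ≤ (hand.count c : Int)) (h2 : m2 ≤ (hand.count 2 : Int))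
    (hT2 : i = 2 → 3 ≤ (hand.count 2 : Int) - m2)
    (hTn : i ≠ 2 → BigD ((hand.count i : Int)) ((hand.count 2 : Int) - m2)) :
    4 ≤ avail hand c ∧ phi hand c i := by
  constructor
  · simp only [avail, if_neg hc]; omega
  · simp only [phi, Rof, if_neg hc]
    by_cases hi2 : i = 2
    · rw [if_pos hi2]; have := hT2 hi2; omega
    · rw [if_neg hi2]; have := hTn hi2; simp only [BigD] at this; omega

lemma A_iff_ne (hand : List Int) (c : Int) (hc : c ≠ 2) :
    fullerhouse hand c = true ↔
      7 ≤ hand.length ∧ 4 ≤ avail hand c ∧ ∃ i, inS c i ∧ phi hand c i := by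
  by_cases hlen : hand.length < 7
  · rw [fullerhouse, if_pos hlen]
    simp only [Bool.false_eq_true, false_iff]
    rintro ⟨h7, -⟩; omega
  · rw [fullerhouse, if_neg hlen]
    simp only [List.any_cons, List.any_nil, Bool.or_eq_true, Bool.false_eq_true, or_false,
      ifFalseEq, containsAll_counter_iff, inner_iff]
    have hc2 : (2 : Int) ≠ c := Ne.symm hc
    constructor
    · rintro (⟨hC, i, hS, hT⟩ | ⟨hC, i, hS, hT⟩ | ⟨hC, i, hS, hT⟩ | ⟨hC, i, hS, hT⟩ | ⟨hC, i, hS, hT⟩) <;>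
        have hic : i ≠ c := inS_ne c i hS
      -- m = [c,c,c,c]
      · have h1 := hC c (by simp)
        simp [List.count_cons, hc, hc2] at h1
        obtain ⟨hA, hP⟩ := fwd_case hand c i hc 0 (by omega) (by omega) (by omega) (by omega)
          (fun hi2 => by
            subst hi2; rw [threeok_rm_two] at hT
            simpa [List.count_cons, hc, hc2] using hT)
          (fun hi2 => by
            rw [threeok_rm hand _ i hi2] at hT
            simpa [List.count_cons, hc, Ne.symm hic, Ne.symm hi2, hc2] using hT)
        exact ⟨by omega, hA, i, hS, hP⟩
      -- m = [c,c,c,2]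
      · have h1 := hC c (by simp)
        have h2 := hC 2 (by simp)
        simp [List.count_cons, hc, hc2, -List.count_pos_iff, -List.one_le_count_iff] at h1 h2
        obtain ⟨hA, hP⟩ := fwd_case hand c i hc 1 (by omega) (by omega) (by omega) (by omega)
          (fun hi2 => by
            subst hi2; rw [threeok_rm_two] at hT
            simpa [List.count_cons, hc, hc2] using hT)
          (fun hi2 => by
            rw [threeok_rm hand _ i hi2] at hT
            simpa [List.count_cons, hc, Ne.symm hic, Ne.symm hi2, hc2] using hT)
        exact ⟨by omega, hA, i, hS, hP⟩
      -- m = [c,c,2,2]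
      · have h1 := hC c (by simp)
        have h2 := hC 2 (by simp)
        simp [List.count_cons, hc, hc2, -List.count_pos_iff, -List.one_le_count_iff] at h1 h2
        obtain ⟨hA, hP⟩ := fwd_case hand c i hc 2 (by omega) (by omega) (by omega) (by omega)
          (fun hi2 => by
            subst hi2; rw [threeok_rm_two] at hT
            simpa [List.count_cons, hc, hc2] using hT)
          (fun hi2 => by
            rw [threeok_rm hand _ i hi2] at hT
            simpa [List.count_cons, hc, Ne.symm hic, Ne.symm hi2, hc2] using hT)
        exact ⟨by omega, hA, i, hS, hP⟩
      -- m = [c,2,2,2]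
      · have h1 := hC c (by simp)
        have h2 := hC 2 (by simp)
        simp [List.count_cons, hc, hc2, -List.count_pos_iff, -List.one_le_count_iff] at h1 h2
        obtain ⟨hA, hP⟩ := fwd_case hand c i hc 3 (by omega) (by omega) (by omega) (by omega)
          (fun hi2 => by
            subst hi2; rw [threeok_rm_two] at hT
            simpa [List.count_cons, hc, hc2] using hT)
          (fun hi2 => by
            rw [threeok_rm hand _ i hi2] at hT
            simpa [List.count_cons, hc, Ne.symm hic, Ne.symm hi2, hc2] using hT)
        exact ⟨by omega, hA, i, hS, hP⟩
      -- m = [2,2,2,2]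
      · have h2 := hC 2 (by simp)
        simp [List.count_cons, hc, hc2] at h2
        obtain ⟨hA, hP⟩ := fwd_case hand c i hc 4 (by omega) (by omega) (by omega) (by omega)
          (fun hi2 => by
            subst hi2; rw [threeok_rm_two] at hT
            simpa [List.count_cons, hc, hc2] using hT)
          (fun hi2 => by
            rw [threeok_rm hand _ i hi2] at hT
            simpa [List.count_cons, hc, Ne.symm hic, Ne.symm hi2, hc2] using hT)
        exact ⟨by omega, hA, i, hS, hP⟩
    · rintro ⟨h7, h4, i, hS, hφ⟩
      simp only [avail, if_neg hc] at h4
      have hic : i ≠ c := inS_ne c i hS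
      have hR : Rof hand c = (hand.count 2 : Int) - max 0 (4 - (hand.count c : Int)) := by
        rw [Rof, if_neg hc]
      have hφ2 : i = 2 → 3 ≤ (hand.count 2 : Int) - max 0 (4 - (hand.count c : Int)) := by
        intro hi2; rw [phi, if_pos hi2, hR] at hφ; exact hφ
      have hφn : i ≠ 2 → 3 ≤ (hand.count i : Int) +
          ((hand.count 2 : Int) - max 0 (4 - (hand.count c : Int))) := by
        intro hi2; rw [phi, if_neg hi2, hR] at hφ; exact hφ
      have hthree : ∀ m2 : Int, m2 = max 0 (4 - (hand.count c : Int)) →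
          ∀ m : List Int, (List.count 2 m : Int) = m2 → List.count i m = 0 ∨ i = 2 →
          threeok (removeMatch hand m) i = true := by
        intro m2 hmax m hcount him
        by_cases hi2 : i = 2
        · subst hi2; rw [threeok_rm_two, hcount]
          have hx := hφ2 rfl
          omega
        · rw [threeok_rm hand _ i hi2, hcount]
          have him0 : List.count i m = 0 := by tauto
          rw [him0]
          have := hφn hi2
          simp only [BigD]; omega
      by_cases h4c : 4 ≤ (hand.count c : Int)
      · refine Or.inl ⟨?_, i, hS, ?_⟩
        · intro k hk; simp at hk; rw [hk]
          simp [List.count_cons, hc, hc2, -List.count_pos_iff, -List.one_le_count_iff]; omega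
        · refine hthree 0 (by omega) _ ?_ ?_
          · simp [List.count_cons, hc, hc2]
          · by_cases hi2 : i = 2
            · exact Or.inr hi2
            · exact Or.inl (by simp [List.count_cons, Ne.symm hic, Ne.symm hi2])
      · by_cases h3c : (hand.count c : Int) = 3
        · refine Or.inr (Or.inl ⟨?_, i, hS, ?_⟩)
          · intro k hk; simp at hk
            rcases hk with hk | hk <;> rw [hk] <;> simp [List.count_cons, hc2, Ne.symm hc, -List.count_pos_iff, -List.one_le_count_iff] <;> omega
          · refine hthree 1 (by omega) _ ?_ ?_
            · simp [List.count_cons, hc, hc2]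
            · by_cases hi2 : i = 2
              · exact Or.inr hi2
              · exact Or.inl (by simp [List.count_cons, Ne.symm hic, Ne.symm hi2])
        · by_cases h2c : (hand.count c : Int) = 2
          · refine Or.inr (Or.inr (Or.inl ⟨?_, i, hS, ?_⟩))
            · intro k hk; simp at hk
              rcases hk with hk | hk <;> rw [hk] <;> simp [List.count_cons, hc2, Ne.symm hc, -List.count_pos_iff, -List.one_le_count_iff] <;> omega
            · refine hthree 2 (by omega) _ ?_ ?_
              · simp [List.count_cons, hc, hc2]
              · by_cases hi2 : i = 2
                · exact Or.inr hi2
                · exact Or.inl (by simp [List.count_cons, Ne.symm hic, Ne.symm hi2])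
          · by_cases h1c : (hand.count c : Int) = 1
            · refine Or.inr (Or.inr (Or.inr (Or.inl ⟨?_, i, hS, ?_⟩)))
              · intro k hk; simp at hk
                rcases hk with hk | hk <;> rw [hk] <;> simp [List.count_cons, hc2, Ne.symm hc, -List.count_pos_iff, -List.one_le_count_iff] <;> omega
              · refine hthree 3 (by omega) _ ?_ ?_
                · simp [List.count_cons, hc, hc2]
                · by_cases hi2 : i = 2
                  · exact Or.inr hi2
                  · exact Or.inl (by simp [List.count_cons, Ne.symm hic, Ne.symm hi2])
            · refine Or.inr (Or.inr (Or.inr (Or.inr ⟨?_, i, hS, ?_⟩)))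
              · intro k hk; simp at hk; rw [hk]; simp [List.count_cons, hc, hc2, -List.count_pos_iff, -List.one_le_count_iff]; omega
              · refine hthree 4 (by omega) _ ?_ ?_
                · simp [List.count_cons, hc, hc2]
                · by_cases hi2 : i = 2
                  · exact Or.inr hi2
                  · exact Or.inl (by simp [List.count_cons, Ne.symm hic, Ne.symm hi2])

lemma A_iff_two (hand : List Int) :
    fullerhouse hand 2 = true ↔
      7 ≤ hand.length ∧ 4 ≤ avail hand 2 ∧ ∃ i, inS 2 i ∧ phi hand 2 i := by
  by_cases hlen : hand.length < 7
  · rw [fullerhouse, if_pos hlen]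
    simp only [Bool.false_eq_true, false_iff]
    rintro ⟨h7, -⟩; omega
  · rw [fullerhouse, if_neg hlen]
    simp only [List.any_cons, List.any_nil, Bool.or_eq_true, Bool.false_eq_true, or_false,
      ifFalseEq, containsAll_counter_iff, inner_iff, or_self]
    constructor
    · rintro ⟨hC, i, hS, hT⟩
      have h2 := hC 2 (by simp)
      simp [List.count_cons, -List.count_pos_iff, -List.one_le_count_iff] at h2
      have hi2 : i ≠ 2 := by rcases hS with ⟨ha, hb⟩ | ⟨ha, hb⟩ <;> omega
      rw [threeok_rm hand _ i hi2] at hT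
      simp [List.count_cons, Ne.symm hi2, -List.count_pos_iff, -List.one_le_count_iff] at hT
      refine ⟨by omega, by simp [avail]; omega, i, hS, ?_⟩
      simp [phi, Rof, hi2]
      simp only [BigD] at hT
      omega
    · rintro ⟨h7, h4, i, hS, hφ⟩
      simp [avail] at h4
      have hi2 : i ≠ 2 := by rcases hS with ⟨ha, hb⟩ | ⟨ha, hb⟩ <;> omega
      simp [phi, Rof, hi2] at hφ
      refine ⟨?_, i, hS, ?_⟩
      · intro k hk; simp at hk; rw [hk]
        simp [List.count_cons, -List.count_pos_iff, -List.one_le_count_iff]; omega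
      · rw [threeok_rm hand _ i hi2]
        simp [List.count_cons, Ne.symm hi2, -List.count_pos_iff, -List.one_le_count_iff]
        simp only [BigD]; omega

lemma B_iff (hand : List Int) (c : Int) :
    fullerhouse_alt hand c = true ↔
      7 ≤ hand.length ∧ 4 ≤ avail hand c ∧ ∃ i, inS c i ∧ phi hand c i := by
  by_cases hlen : hand.length < 7
  · rw [fullerhouse_alt, if_pos hlen]
    simp only [Bool.false_eq_true, false_iff]
    rintro ⟨h7, -⟩; omega
  · rw [fullerhouse_alt, if_neg hlen]
    by_cases hc : c = 2
    · subst hc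
      rw [if_pos rfl]
      simp only [PySem.Dict.getD_counter]
      split_ifs with h1 h2
      · simp only [Bool.false_eq_true, false_iff]
        rintro ⟨-, h4, -⟩
        simp [avail] at h4; omega
      · simp only [true_iff]
        refine ⟨by omega, by simp [avail]; omega, 3, Or.inr ⟨by omega, by omega⟩, ?_⟩
        simp [phi, Rof]
        omega
      · simp only [List.any_eq_true, PySem.Dict.keys_counter, PySem.Set.mem_ofList,
          Bool.and_eq_true, Bool.or_eq_true, decide_eq_true_eq, Bool.not_eq_eq_eq_not,
          Bool.not_true, beq_eq_false_iff_ne, PySem.Dict.getD_counter]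
        constructor
        · rintro ⟨i, hmem, ⟨hrange, hne2⟩, hcnt⟩
          refine ⟨by omega, by simp [avail]; omega, i, hrange, ?_⟩
          simp [phi, Rof, hne2]; omega
        · rintro ⟨h7, h4, i, hS, hφ⟩
          simp [avail] at h4
          have hi2 : i ≠ 2 := by rcases hS with ⟨ha, hb⟩ | ⟨ha, hb⟩ <;> omega
          simp [phi, Rof, hi2] at hφ
          refine ⟨i, ?_, ⟨hS, hi2⟩, by omega⟩
          have : 0 < List.count i hand := by omega
          exact List.count_pos_iff.mp this
    · rw [if_neg hc]
      simp only [PySem.Dict.getD_counter]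
      have hR : Rof hand c = (hand.count 2 : Int) - max 0 (4 - (hand.count c : Int)) := by
        rw [Rof, if_neg hc]
      split_ifs with h1 h2
      · simp only [Bool.false_eq_true, false_iff]
        rintro ⟨-, h4, -⟩
        simp only [avail, if_neg hc] at h4; omega
      · simp only [true_iff]
        refine ⟨by omega, by simp [avail, hc]; omega, ?_⟩
        by_cases hc3 : 3 ≤ c
        · refine ⟨2, Or.inl ⟨by omega, by omega⟩, ?_⟩
          simp [phi, hR]; omega
        · refine ⟨c + 1, Or.inr ⟨by omega, by omega⟩, ?_⟩
          by_cases hce : c + 1 = 2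
          · simp only [phi, if_pos hce, hR]; omega
          · simp only [phi, if_neg hce, hR]; omega
      · simp only [List.any_eq_true, PySem.Dict.keys_counter, PySem.Set.mem_ofList,
          Bool.and_eq_true, Bool.or_eq_true, decide_eq_true_eq, Bool.not_eq_eq_eq_not,
          Bool.not_true, beq_eq_false_iff_ne, PySem.Dict.getD_counter]
        constructor
        · rintro ⟨i, hmem, ⟨hrange, hne2⟩, hcnt⟩
          refine ⟨by omega, by simp [avail, hc]; omega, i, hrange, ?_⟩
          simp only [phi, if_neg hne2, hR]; omega
        · rintro ⟨h7, h4, i, hS, hφ⟩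
          simp only [avail, if_neg hc] at h4
          have hi2 : i ≠ 2 := by
            intro hi2
            rw [phi, if_pos hi2, hR] at hφ; omega
          rw [phi, if_neg hi2, hR] at hφ
          refine ⟨i, ?_, ⟨hS, hi2⟩, by omega⟩
          have : 0 < List.count i hand := by omega
          exact List.count_pos_iff.mp this

-- ===== VERDICT (by name: the statement is the Claim_ definition above) =====
theorem fullerhouse_spec : Claim_equal_fullerhouse := by
  intro hand c _
  unfold Spec_fullerhouse
  rw [Bool.eq_iff_iff, B_iff]
  by_cases hc : c = 2
  · subst hc; exact A_iff_two hand
  · exact A_iff_ne hand c hc
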